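-- pv_equiv track=rewrite | github.com/Lecrut/Diffusion-code-generation | data/code/13_11_1.py | scale_time_differences
-- ===== SOURCE A (Python) =====
-- def scale_time_differences(time_difference_strings):
--     total_seconds = 0
--     for time_str in time_difference_strings:
--         try:
--             if "days" in time_str.lower():
--                 parts = time_str.split(" ")
--                 if len(parts) == 2:
--                     days = int(parts[0])
--                     hours = int(parts[1])
--                     total_seconds += (days * 24 * 3600) + (hours * 3600)
--             elif "hours" in time_str.lower():
--                 parts = time_str.split(" ")
--                 if len(parts) == 2:
--                     hours = int(parts[0])
--                     total_seconds += hours * 3600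
--             elif "minutes" in time_str.lower():
--                 parts = time_str.split(" ")
--                 if len(parts) == 2:
--                     minutes = int(parts[0])
--                     total_seconds += minutes * 60
--             elif "seconds" in time_str.lower():
--                 parts = time_str.split(" ")
--                 if len(parts) == 2:
--                     seconds = int(parts[0])
--                     total_seconds += seconds
--             else:
--                 pass
--         except ValueError:
--             continue
--         except IndexError:
--             continue
--     total_seconds = int(total_seconds)
--     days = total_seconds // (24 * 3600)
--     remaining_seconds = total_seconds % (24 * 3600)
--     hours = remaining_seconds // 3600
--     remaining_seconds %= 3600
--     minutes = remaining_seconds // 60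
--     seconds = remaining_seconds % 60
--     return {
--         "days": days,
--         "hours": hours,
--         "minutes": minutes,
--         "seconds": seconds
--     }
-- ===== SOURCE B (Python) =====
-- def _parse(time_str):
--     """Component vector (days, hours, minutes, seconds) contributed by one line."""
--     parts = time_str.split(" ")
--     if len(parts) != 2:
--         return (0, 0, 0, 0)
--     low = time_str.lower()
--     try:
--         if "days" in low:
--             return (int(parts[0]), int(parts[1]), 0, 0)
--         if "hours" in low:
--             return (0, int(parts[0]), 0, 0)
--         if "minutes" in low:
--             return (0, 0, int(parts[0]), 0)
--         if "seconds" in low: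
--             return (0, 0, 0, int(parts[0]))
--     except ValueError:
--         pass
--     return (0, 0, 0, 0)
--
--
-- def scale_time_differences(time_difference_strings):
--     vecs = [_parse(t) for t in time_difference_strings]
--     d = sum(v[0] for v in vecs)
--     h = sum(v[1] for v in vecs)
--     m = sum(v[2] for v in vecs)
--     s = sum(v[3] for v in vecs)
--     # normalize by carrying each unit into the next larger one
--     m += s // 60
--     s %= 60
--     h += m // 60
--     m %= 60
--     d += h // 24
--     h %= 24
--     return {"days": d, "hours": h, "minutes": m, "seconds": s}
-- ===== Notes on version B (the rewrite author's own statement) =====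
-- stated objective: alternative
-- what changed: B keeps a four-component (days, hours, minutes, seconds) vector per line and sums each component in a separate staged pass, then normalizes by carrying seconds into minutes, minutes into hours and hours into days, instead of A's single scalar seconds accumulator followed by a divmod chain on the total.
import Mathlib
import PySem

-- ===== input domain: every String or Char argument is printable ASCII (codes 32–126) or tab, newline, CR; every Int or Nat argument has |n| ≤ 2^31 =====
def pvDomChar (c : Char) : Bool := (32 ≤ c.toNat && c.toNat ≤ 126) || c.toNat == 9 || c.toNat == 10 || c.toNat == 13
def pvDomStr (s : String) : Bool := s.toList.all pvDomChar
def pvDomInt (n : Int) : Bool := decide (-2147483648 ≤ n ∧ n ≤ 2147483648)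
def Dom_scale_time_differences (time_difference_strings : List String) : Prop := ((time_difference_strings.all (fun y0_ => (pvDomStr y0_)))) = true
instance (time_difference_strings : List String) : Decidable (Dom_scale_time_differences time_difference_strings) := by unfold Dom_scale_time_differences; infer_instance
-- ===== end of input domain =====

-- B accumulates a (days, hours, minutes, seconds) component vector per line and
-- normalizes by carries instead of summing seconds and divmod-ing a scalar total
-- (objective: alternative decomposition).

-- ===== PORT A =====
-- one iteration of A's for-loop, on the Chars level (exact: lower/isIn/splitOn/ofChars?);
-- the try/except (ValueError from int) is modelled by the Option results of
-- PySem.Int.ofChars?: a failed parse leaves total unchanged (= continue)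
def pvAStep (total : Int) (time_str : String) : Int :=
  if PySem.Chars.isIn ['d','a','y','s'] (PySem.Chars.lower time_str.toList) then
    let parts := PySem.Chars.splitOn time_str.toList [' ']
    if parts.length == 2 then
      match PySem.List.pyGet? parts 0, PySem.List.pyGet? parts 1 with
      | some s0, some s1 =>
        match PySem.Int.ofChars? s0, PySem.Int.ofChars? s1 with
        | some days, some hours => total + (days * 24 * 3600 + hours * 3600)
        | _, _ => total
      | _, _ => total
    else total
  else if PySem.Chars.isIn ['h','o','u','r','s'] (PySem.Chars.lower time_str.toList) then
    let parts := PySem.Chars.splitOn time_str.toList [' ']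
    if parts.length == 2 then
      match PySem.List.pyGet? parts 0 with
      | some s0 =>
        match PySem.Int.ofChars? s0 with
        | some hours => total + hours * 3600
        | none => total
      | none => total
    else total
  else if PySem.Chars.isIn ['m','i','n','u','t','e','s'] (PySem.Chars.lower time_str.toList) then
    let parts := PySem.Chars.splitOn time_str.toList [' ']
    if parts.length == 2 then
      match PySem.List.pyGet? parts 0 with
      | some s0 =>
        match PySem.Int.ofChars? s0 with
        | some minutes => total + minutes * 60
        | none => total
      | none => total
    else total
  else if PySem.Chars.isIn ['s','e','c','o','n','d','s'] (PySem.Chars.lower time_str.toList) then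
    let parts := PySem.Chars.splitOn time_str.toList [' ']
    if parts.length == 2 then
      match PySem.List.pyGet? parts 0 with
      | some s0 =>
        match PySem.Int.ofChars? s0 with
        | some seconds => total + seconds
        | none => total
      | none => total
    else total
  else total

def scale_time_differences (time_difference_strings : List String) : List (String × Int) :=
  let total_seconds := time_difference_strings.foldl pvAStep 0
  let days := PySem.Int.floordiv total_seconds (24 * 3600)
  let remaining_seconds := PySem.Int.mod total_seconds (24 * 3600)
  let hours := PySem.Int.floordiv remaining_seconds 3600
  let remaining_seconds2 := PySem.Int.mod remaining_seconds 3600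
  let minutes := PySem.Int.floordiv remaining_seconds2 60
  let seconds := PySem.Int.mod remaining_seconds2 60
  [("days", days), ("hours", hours), ("minutes", minutes), ("seconds", seconds)]

-- ===== PORT B =====
-- the (days, hours, minutes, seconds) component vector one line contributes
def pvParse (time_str : String) : Int × Int × Int × Int :=
  match PySem.Chars.splitOn time_str.toList [' '] with
  | [p0, p1] =>
    let low := PySem.Chars.lower time_str.toList
    if PySem.Chars.isIn ['d','a','y','s'] low then
      match PySem.Int.ofChars? p0, PySem.Int.ofChars? p1 with
      | some d, some h => (d, h, 0, 0)
      | _, _ => (0, 0, 0, 0)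
    else if PySem.Chars.isIn ['h','o','u','r','s'] low then
      match PySem.Int.ofChars? p0 with
      | some h => (0, h, 0, 0)
      | none => (0, 0, 0, 0)
    else if PySem.Chars.isIn ['m','i','n','u','t','e','s'] low then
      match PySem.Int.ofChars? p0 with
      | some m => (0, 0, m, 0)
      | none => (0, 0, 0, 0)
    else if PySem.Chars.isIn ['s','e','c','o','n','d','s'] low then
      match PySem.Int.ofChars? p0 with
      | some s => (0, 0, 0, s)
      | none => (0, 0, 0, 0)
    else (0, 0, 0, 0)
  | _ => (0, 0, 0, 0)

def scale_time_differences_alt (time_difference_strings : List String) : List (String × Int) :=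
  let vecs := time_difference_strings.map pvParse
  let d := (vecs.map (fun v => v.1)).sum
  let h := (vecs.map (fun v => v.2.1)).sum
  let m := (vecs.map (fun v => v.2.2.1)).sum
  let s := (vecs.map (fun v => v.2.2.2)).sum
  -- normalize by carrying each unit into the next larger one
  let m2 := m + PySem.Int.floordiv s 60
  let s2 := PySem.Int.mod s 60
  let h2 := h + PySem.Int.floordiv m2 60
  let m3 := PySem.Int.mod m2 60
  let d2 := d + PySem.Int.floordiv h2 24
  let h3 := PySem.Int.mod h2 24
  [("days", d2), ("hours", h3), ("minutes", m3), ("seconds", s2)]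

-- ===== PRECONDITION & SPEC =====
def Spec_scale_time_differences (time_difference_strings : List String) (out : List (String × Int)) : Prop := out = scale_time_differences_alt time_difference_strings
instance (time_difference_strings : List String) (out : List (String × Int)) : Decidable (Spec_scale_time_differences time_difference_strings out) := by unfold Spec_scale_time_differences; infer_instance

-- ===== CLAIM (what is proved, stated in full; the proofs are below) =====
def Claim_equal_scale_time_differences : Prop := ∀ (time_difference_strings : List String), Dom_scale_time_differences time_difference_strings → Spec_scale_time_differences time_difference_strings (scale_time_differences time_difference_strings)

-- ===== LEMMAS AND PROOFS =====
-- the number of seconds a component vector stands for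
def pvWeight (v : Int × Int × Int × Int) : Int :=
  v.1 * 86400 + v.2.1 * 3600 + v.2.2.1 * 60 + v.2.2.2

theorem pvAStep_eq (total : Int) (s : String) :
    pvAStep total s = total + pvWeight (pvParse s) := by
  unfold pvAStep pvParse pvWeight
  rcases hp : PySem.Chars.splitOn s.toList [' '] with _ | ⟨p0, _ | ⟨p1, _ | ⟨p2, rest⟩⟩⟩ <;>
    split_ifs <;>
    simp_all [PySem.List.pyGet?, PySem.List.pyIdx?] <;>
    (try cases PySem.Int.ofChars? p0) <;>
    (try cases PySem.Int.ofChars? p1) <;>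
    simp_all <;> omega

theorem pvFoldl_eq (l : List String) (init : Int) :
    l.foldl pvAStep init = init + ((l.map pvParse).map pvWeight).sum := by
  induction l generalizing init with
  | nil => simp
  | cons x xs ih => simp [List.foldl, pvAStep_eq, ih, add_assoc]

theorem pvSum_weight (vs : List (Int × Int × Int × Int)) :
    (vs.map pvWeight).sum =
      (vs.map (fun v => v.1)).sum * 86400 + (vs.map (fun v => v.2.1)).sum * 3600 +
      (vs.map (fun v => v.2.2.1)).sum * 60 + (vs.map (fun v => v.2.2.2)).sum := by
  induction vs with
  | nil => simp
  | cons v vs ih => simp [pvWeight, ih]; ring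

-- divmod chain of the weighted total = carry normalization of the components
theorem pvCarry_days (d h m s : Int) :
    PySem.Int.floordiv (d * 86400 + h * 3600 + m * 60 + s) 86400 =
      d + PySem.Int.floordiv (h + PySem.Int.floordiv (m + PySem.Int.floordiv s 60) 60) 24 := by
  simp only [PySem.Int.floordiv_eq_ediv_of_pos (by omega : (0:Int) < 86400),
    PySem.Int.floordiv_eq_ediv_of_pos (by omega : (0:Int) < 60),
    PySem.Int.floordiv_eq_ediv_of_pos (by omega : (0:Int) < 24)]
  omega

theorem pvCarry_hours (d h m s : Int) :
    PySem.Int.floordiv (PySem.Int.mod (d * 86400 + h * 3600 + m * 60 + s) 86400) 3600 =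
      PySem.Int.mod (h + PySem.Int.floordiv (m + PySem.Int.floordiv s 60) 60) 24 := by
  simp only [PySem.Int.floordiv_eq_ediv_of_pos (by omega : (0:Int) < 3600),
    PySem.Int.floordiv_eq_ediv_of_pos (by omega : (0:Int) < 60),
    PySem.Int.mod_eq_emod_of_pos (by omega : (0:Int) < 86400),
    PySem.Int.mod_eq_emod_of_pos (by omega : (0:Int) < 24)]
  omega

theorem pvCarry_minutes (d h m s : Int) :
    PySem.Int.floordiv (PySem.Int.mod (PySem.Int.mod (d * 86400 + h * 3600 + m * 60 + s) 86400) 3600) 60 =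
      PySem.Int.mod (m + PySem.Int.floordiv s 60) 60 := by
  simp only [PySem.Int.floordiv_eq_ediv_of_pos (by omega : (0:Int) < 60),
    PySem.Int.mod_eq_emod_of_pos (by omega : (0:Int) < 86400),
    PySem.Int.mod_eq_emod_of_pos (by omega : (0:Int) < 3600),
    PySem.Int.mod_eq_emod_of_pos (by omega : (0:Int) < 60)]
  omega

theorem pvCarry_seconds (d h m s : Int) :
    PySem.Int.mod (PySem.Int.mod (PySem.Int.mod (d * 86400 + h * 3600 + m * 60 + s) 86400) 3600) 60 =
      PySem.Int.mod s 60 := by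
  simp only [PySem.Int.mod_eq_emod_of_pos (by omega : (0:Int) < 86400),
    PySem.Int.mod_eq_emod_of_pos (by omega : (0:Int) < 3600),
    PySem.Int.mod_eq_emod_of_pos (by omega : (0:Int) < 60)]
  omega

-- ===== VERDICT (by name: the statement is the Claim_ definition above) =====
theorem scale_time_differences_spec : Claim_equal_scale_time_differences := by
  intro l _
  unfold Spec_scale_time_differences scale_time_differences scale_time_differences_alt
  have h24 : (24 * 3600 : Int) = 86400 := by norm_num
  rw [pvFoldl_eq, zero_add, pvSum_weight]
  simp only [h24, pvCarry_days, pvCarry_hours, pvCarry_minutes, pvCarry_seconds]
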